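-- pv_equiv track=rewrite | github.com/lppier/Hackerrank_Python | LeetCode/skyline.py | merge_skylines
-- ===== SOURCE A (Python) =====
-- def merge_skylines(left, right):
--
--     # left / right skyline format is [[x1, y], [x2, 0]]
--
--     def update_output(x, y):
--         """
--         Update the final output with the new element.
--         """
--         # if skyline change is not vertical -
--         # add the new point
--         if not output or output[-1][0] != x:
--             output.append([x, y])
--         # if skyline change is vertical -
--         # update the last point
--         else:
--             output[-1][1] = y # x is the same, just change the last output
--
--     def append_skyline(p, lst, n, y, curr_y):
--         """
--         Append the rest of the skyline elements with indice (p, n)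
--         to the final output.
--         """
--         while p < n:
--             x, y = lst[p]
--             p += 1
--             if curr_y != y:
--                 update_output(x, y)
--                 curr_y = y
--
--     n_l, n_r = len(left), len(right)
--     p_l = 0
--     p_r = 0 # index pter for left and right buildings respectively
--     curr_y = left_y = right_y = 0
--     output = []
--
--     while p_l < n_l and p_r < n_r:
--         point_l, point_r = left[p_l], right[p_r]
--         # pick smallest x
--         if point_l[0] < point_r[0]:
--             x, left_y = point_l
--             p_l += 1
--         else:
--             x, right_y = point_r
--             p_r += 1
--
--         max_y = max(left_y, right_y)
--         if curr_y != max_y: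
--             update_output(x, max_y)
--             curr_y = max_y
--
--     append_skyline(p_l, left, n_l, left_y, curr_y)
--     append_skyline(p_r, right, n_r, right_y, curr_y)
--
--     return output
-- ===== SOURCE B (Python) =====
-- def merge_skylines(left, right):
--     # Phase 1: merge the two skylines by x into one raw event stream,
--     # recording the running max height at every event.
--     events = []
--     i = j = 0
--     left_y = right_y = 0
--     while i < len(left) and j < len(right):
--         if left[i][0] < right[j][0]:
--             x, left_y = left[i]
--             i += 1
--         else:
--             x, right_y = right[j]
--             j += 1
--         events.append((x, max(left_y, right_y)))
--     for x, y in left[i:]: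
--         events.append((x, y))
--     for x, y in right[j:]:
--         events.append((x, y))
--     # Phase 2: compress the raw stream into the final output,
--     # dropping repeated heights and coalescing same-x (vertical) changes.
--     out = []
--     curr = 0
--     for x, v in events:
--         if v != curr:
--             if out and out[-1][0] == x:
--                 out[-1][1] = v
--             else:
--                 out.append([x, v])
--             curr = v
--     return out
-- ===== Notes on version B (the rewrite author's own statement) =====
-- stated objective: alternative
-- what changed: A fuses merging and output compression into one pass with mutating closures (update_output/append_skyline); B first builds a raw merged event list of (x, running max height) and then compresses it in a separate second pass.
import Mathlib
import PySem

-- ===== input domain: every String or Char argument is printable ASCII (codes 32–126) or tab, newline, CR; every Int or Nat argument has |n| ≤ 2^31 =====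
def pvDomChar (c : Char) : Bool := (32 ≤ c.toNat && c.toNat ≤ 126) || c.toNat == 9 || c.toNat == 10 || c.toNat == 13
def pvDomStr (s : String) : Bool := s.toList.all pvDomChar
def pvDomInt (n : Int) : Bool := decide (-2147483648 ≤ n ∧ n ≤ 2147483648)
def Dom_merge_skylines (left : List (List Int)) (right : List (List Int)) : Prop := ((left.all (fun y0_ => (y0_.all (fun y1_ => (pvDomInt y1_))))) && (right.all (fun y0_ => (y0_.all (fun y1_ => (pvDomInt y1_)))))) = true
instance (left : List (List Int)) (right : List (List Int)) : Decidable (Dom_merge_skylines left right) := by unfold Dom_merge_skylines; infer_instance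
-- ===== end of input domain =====

-- B replaces A's fused merge-and-compress pass (mutating closures) by two passes: a raw
-- merged event list, then a separate compression pass; same values, same cost (objective: alternative).

-- shared row accessors: row[0] and row[1] (rows have length 2 under Pre_)
def pvX (r : List Int) : Int := r.headD 0
def pvY (r : List Int) : Int := (r.drop 1).headD 0

-- ===== PORT A =====
-- update_output: append a new point, or overwrite the last point's height when x coincides
def aUpdate (output : List (List Int)) (x y : Int) : List (List Int) :=
  if output = [] ∨ pvX (output.getLast?.getD []) ≠ x then output ++ [[x, y]]
  else output.dropLast ++ [(output.getLast?.getD []).set 1 y]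

-- append_skyline: flush the remaining points of one list (the y parameter is unused, as in A)
def appendSkyline (lst : List (List Int)) (_y : Int) (curr_y : Int) (output : List (List Int)) : List (List Int) :=
  match lst, curr_y, output with
  | [], _, output => output
  | row :: rest, curr_y, output =>
    if curr_y ≠ pvY row then appendSkyline rest (pvY row) (pvY row) (aUpdate output (pvX row) (pvY row))
    else appendSkyline rest (pvY row) curr_y output

-- the main while loop over both lists
def mergeLoop : List (List Int) → List (List Int) → Int → Int → Int → List (List Int) → List (List Int)
  | pl :: lrest, pr :: rrest, left_y, right_y, curr_y, output =>
    if pvX pl < pvX pr then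
      if curr_y ≠ max (pvY pl) right_y then
        mergeLoop lrest (pr :: rrest) (pvY pl) right_y (max (pvY pl) right_y) (aUpdate output (pvX pl) (max (pvY pl) right_y))
      else mergeLoop lrest (pr :: rrest) (pvY pl) right_y curr_y output
    else
      if curr_y ≠ max left_y (pvY pr) then
        mergeLoop (pl :: lrest) rrest left_y (pvY pr) (max left_y (pvY pr)) (aUpdate output (pvX pr) (max left_y (pvY pr)))
      else mergeLoop (pl :: lrest) rrest left_y (pvY pr) curr_y output
  | left, right, left_y, right_y, curr_y, output =>
    appendSkyline right right_y curr_y (appendSkyline left left_y curr_y output)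
termination_by l r _ _ _ _ => l.length + r.length

def merge_skylines (left : List (List Int)) (right : List (List Int)) : List (List Int) :=
  mergeLoop left right 0 0 0 []

-- ===== PORT B =====
-- phase 1: raw merged event stream (x, running max height); tails contribute their own heights
def rawEvents : List (List Int) → List (List Int) → Int → Int → List (Int × Int)
  | pl :: lrest, pr :: rrest, left_y, right_y =>
    if pvX pl < pvX pr then (pvX pl, max (pvY pl) right_y) :: rawEvents lrest (pr :: rrest) (pvY pl) right_y
    else (pvX pr, max left_y (pvY pr)) :: rawEvents (pl :: lrest) rrest left_y (pvY pr)
  | left, right, _, _ =>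
    left.map (fun r => (pvX r, pvY r)) ++ right.map (fun r => (pvX r, pvY r))
termination_by l r _ _ => l.length + r.length

-- phase 2: compress — drop repeated heights, coalesce same-x changes
def compress : List (Int × Int) → Int → List (List Int) → List (List Int)
  | [], _, out => out
  | (x, v) :: rest, curr, out =>
    if v ≠ curr then
      compress rest v
        (if out ≠ [] ∧ pvX (out.getLast?.getD []) = x
         then out.dropLast ++ [(out.getLast?.getD []).set 1 v]
         else out ++ [[x, v]])
    else compress rest curr out

def merge_skylines_alt (left : List (List Int)) (right : List (List Int)) : List (List Int) :=
  compress (rawEvents left right 0 0) 0 []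

-- ===== PRECONDITION & SPEC =====
-- A unpacks every row as 'x, y = row' and so raises ValueError unless every row has length 2;
-- Pre_ excludes exactly those raising inputs (A returns on all inputs admitted here).
def Pre_merge_skylines (left : List (List Int)) (right : List (List Int)) : Prop :=
  (∀ r ∈ left, r.length = 2) ∧ (∀ r ∈ right, r.length = 2)
instance (left : List (List Int)) (right : List (List Int)) : Decidable (Pre_merge_skylines left right) := by unfold Pre_merge_skylines; infer_instance
def pvWitness_merge_skylines : List (List Int) × List (List Int) := ([[1, 3], [5, 0]], [[2, 4], [7, 0]])

def Spec_merge_skylines (left : List (List Int)) (right : List (List Int)) (out : List (List Int)) : Prop := out = merge_skylines_alt left right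
instance (left : List (List Int)) (right : List (List Int)) (out : List (List Int)) : Decidable (Spec_merge_skylines left right out) := by unfold Spec_merge_skylines; infer_instance

-- ===== CLAIM (what is proved, stated in full; the proofs are below) =====
def Claim_equal_merge_skylines : Prop := ∀ (left : List (List Int)) (right : List (List Int)), Dom_merge_skylines left right → Pre_merge_skylines left right → Spec_merge_skylines left right (merge_skylines left right)

-- ===== LEMMAS AND PROOFS =====

-- A's update_output and B's inline coalescing step are the same function
lemma aUpdate_eq_b (out : List (List Int)) (x v : Int) :
    aUpdate out x v =
      (if out ≠ [] ∧ pvX (out.getLast?.getD []) = x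
       then out.dropLast ++ [(out.getLast?.getD []).set 1 v]
       else out ++ [[x, v]]) := by
  unfold aUpdate
  by_cases h0 : out = [] <;> by_cases h1 : pvX (out.getLast?.getD []) = x <;>
    simp [h0, h1]

lemma appendSkyline_nil (y curr : Int) (out : List (List Int)) :
    appendSkyline [] y curr out = out := rfl

-- compressing a mapped tail equals A's append_skyline
lemma compress_map (lst : List (List Int)) (y curr : Int) (out : List (List Int)) :
    compress (lst.map (fun r => (pvX r, pvY r))) curr out = appendSkyline lst y curr out := by
  induction lst generalizing y curr out with
  | nil => simp [compress, appendSkyline]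
  | cons row rest ih =>
    simp only [List.map_cons, compress, appendSkyline]
    by_cases h : pvY row = curr
    · rw [if_neg (by simp [h]), if_neg (by simp [h])]
      exact ih _ _ _
    · rw [if_pos h, if_pos (Ne.symm h), ← aUpdate_eq_b]
      exact ih _ _ _

-- main invariant: A's fused loop equals compressing B's raw event stream
lemma loop_eq (left right : List (List Int)) (ly ry curr : Int) (out : List (List Int)) :
    mergeLoop left right ly ry curr out = compress (rawEvents left right ly ry) curr out := by
  induction left, right, ly, ry using rawEvents.induct generalizing curr out with
  | case1 pl lrest pr rrest ly ry hlt ihl =>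
    rw [mergeLoop, rawEvents, if_pos hlt, if_pos hlt, compress]
    by_cases h : max (pvY pl) ry = curr
    · rw [if_neg (by simp [h]), if_neg (by simp [h])]
      exact ihl _ _
    · rw [if_pos (Ne.symm h), if_pos h, ← aUpdate_eq_b]
      exact ihl _ _
  | case2 pl lrest pr rrest ly ry hlt ihr =>
    rw [mergeLoop, rawEvents, if_neg hlt, if_neg hlt, compress]
    by_cases h : max ly (pvY pr) = curr
    · rw [if_neg (by simp [h]), if_neg (by simp [h])]
      exact ihr _ _
    · rw [if_pos (Ne.symm h), if_pos h, ← aUpdate_eq_b]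
      exact ihr _ _
  | case3 left right ly ry hne =>
    cases left with
    | nil =>
      simp only [mergeLoop, rawEvents, List.map_nil, List.nil_append, appendSkyline_nil]
      exact (compress_map right ry curr out).symm
    | cons pl lrest =>
      cases right with
      | nil =>
        simp only [mergeLoop, rawEvents, List.map_nil, List.append_nil, appendSkyline_nil]
        exact (compress_map (pl :: lrest) ly curr out).symm
      | cons pr rrest => exact (hne pl lrest pr rrest rfl rfl).elim

-- ===== VERDICT (by name: the statement is the Claim_ definition above) =====
theorem merge_skylines_spec : Claim_equal_merge_skylines := by
  intro left right _ _
  unfold Spec_merge_skylines merge_skylines merge_skylines_alt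
  exact loop_eq left right 0 0 0 []
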